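-- pv_equiv track=rewrite | github.com/Smolnik-Vlad/univer_git | course_2/sem2/AOIS/lab2/main.py | reduction_implicants
-- ===== SOURCE A (Python) =====
-- def reduction_implicants(implicants, substitutions):
--     ans = []
--     for i in range(len(implicants)):
--         row = []
--         for j in range(len(implicants)):
--             if i == j:
--                 continue
--             implicant = []
--             for k in range(len(implicants[j])):
--                 keys = list(substitutions[i].keys())
--                 for l in range(len(keys)):
--                     if k != l:
--                         continue
--                     if implicants[j][k][0] == "!":
--                         if implicants[j][k][1:] in keys:
--                             implicant.append(int(not substitutions[i][implicants[j][k][1:]]))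
--                         else:
--                             implicant.append(implicants[j][k])
--                     else:
--                         if implicants[j][k] in keys:
--                             implicant.append(substitutions[i][implicants[j][k]])
--                         else:
--                             implicant.append(implicants[j][k])
--             row.append(implicant)
--         ans.append(row)
--     for row in ans:
--         i = 0
--         while i < len(row):
--             if 0 in row[i]:
--                 row.pop(i)
--                 i = -1
--             i += 1
--     row_results = []
--     for i in range(len(ans)):
--         obj = {}
--         for j in range(len(ans[i])):
--             for el in ans[i][j]:
--                 if type(el) == str:
--                     if el[0] == "!":
--                         if el[1:] in obj:
--                             obj[el[1:]] -= 1
--                         else: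
--                             obj[el[1:]] = -1
--                     else:
--                         if el in obj:
--                             obj[el] += 1
--                         else:
--                             obj[el] = 1
--         row_results.append(obj)
--     answer = []
--     for i in range(len(row_results)):
--         keys = list(row_results[i].keys())
--         sch = 0
--         for j in range(len(keys)):
--             sch += row_results[i][keys[j]]
--         if sch != 0:
--             answer.append(True)
--         else:
--             answer.append(False)
--     return answer
-- ===== SOURCE B (Python) =====
-- def _row_sum(subs, toks):
--     # Signed tally of one substituted implicant, or None if it contains a 0.
--     total = 0
--     for tok in toks:
--         neg = tok.startswith("!")
--         key = tok[1:] if neg else tok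
--         if key in subs:
--             if (subs[key] == 0) != neg:
--                 return None
--         else:
--             total += -1 if neg else 1
--     return total
--
--
-- def reduction_implicants(implicants, substitutions):
--     answer = []
--     for i in range(len(implicants)):
--         subs = substitutions[i]
--         sch = 0
--         for j, imp in enumerate(implicants):
--             if j == i:
--                 continue
--             res = _row_sum(subs, imp[:len(subs)])
--             if res is not None:
--                 sch += res
--         answer.append(sch != 0)
--     return answer
-- ===== Notes on version B (the rewrite author's own statement) =====
-- stated objective: faster
-- what changed: Replaces A's four materialized passes (full n x n substitution matrix, destructive pop-and-restart 0-filter, per-row sign dictionaries, dictionary key-sum pass) with a single direct pass that tallies each row's sign sum on the fly, skipping implicants whose substitution contains a 0.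
-- outside the precondition, e.g. on reduction_implicants([['x']], []): A returns [False], B raises IndexError
import Mathlib
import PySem

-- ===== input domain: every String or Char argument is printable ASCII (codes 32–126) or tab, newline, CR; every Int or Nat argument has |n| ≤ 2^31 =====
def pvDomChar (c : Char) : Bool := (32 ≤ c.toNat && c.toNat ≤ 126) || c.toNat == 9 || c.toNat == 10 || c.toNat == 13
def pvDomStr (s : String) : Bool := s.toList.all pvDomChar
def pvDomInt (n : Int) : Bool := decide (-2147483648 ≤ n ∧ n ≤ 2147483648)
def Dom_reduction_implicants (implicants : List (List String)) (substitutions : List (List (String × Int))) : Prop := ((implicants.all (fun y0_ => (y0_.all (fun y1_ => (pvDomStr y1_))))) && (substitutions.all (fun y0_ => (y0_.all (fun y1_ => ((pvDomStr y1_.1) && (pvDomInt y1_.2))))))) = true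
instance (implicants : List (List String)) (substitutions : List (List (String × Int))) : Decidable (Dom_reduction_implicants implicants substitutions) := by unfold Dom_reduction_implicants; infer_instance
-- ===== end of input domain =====

-- B replaces A's four materialized passes (substitution matrix, destructive pop-and-restart
-- 0-filter, per-row sign dictionaries, dictionary key-sum pass) by one direct tally per row;
-- a timing run measured B faster (A's filter pass is quadratic per row in the worst case).

-- Elements of a substituted implicant: Python mixes ints and strings in these lists.
inductive PyElem
  | int : Int → PyElem
  | str : String → PyElem
deriving DecidableEq, Repr

-- shared dict primitive: d[k] / 'k in d' on an association list (first match, as a Python dict)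
def pvLookup (subs : List (String × Int)) (k : String) : Option Int :=
  (subs.find? (fun p => p.1 == k)).map (·.2)

-- tok[1:]
def pvTail (s : String) : String := String.ofList s.toList.tail

-- ===== PORT A =====

-- tok[0] == "!"  (Python raises IndexError on tok = ""; Pre_ excludes that, the port returns false there)
def pvIsBang (s : String) : Bool := PySem.Str.pyGet? s 0 == some '!'

-- the second pass of A:  i = 0; while i < len(row): if 0 in row[i]: row.pop(i); i = -1; i += 1
def pvFilterLoop (row : List (List PyElem)) (i : Nat) : List (List PyElem) :=
  if h : i < row.length then
    if row[i].contains (PyElem.int 0) then pvFilterLoop (row.eraseIdx i) 0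
    else pvFilterLoop row (i + 1)
  else row
termination_by (row.length, row.length - i)
decreasing_by
  · apply Prod.Lex.left; simp [List.length_eraseIdx, h]; omega
  · apply Prod.Lex.right; omega

-- the count step of A's third pass, for one element el of a substituted implicant
def pvCStep (obj : PySem.Dict String Int) (el : PyElem) : PySem.Dict String Int :=
  match el with
  | PyElem.int _ => obj                                   -- type(el) != str: skipped
  | PyElem.str s =>
    if pvIsBang s then
      if obj.contains (pvTail s) then obj.insert (pvTail s) (obj.getD (pvTail s) 0 - 1)
      else obj.insert (pvTail s) (-1)
    else
      if obj.contains s then obj.insert s (obj.getD s 0 + 1)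
      else obj.insert s 1

def reduction_implicants (implicants : List (List String)) (substitutions : List (List (String × Int))) : List Bool :=
  -- pass 1: ans[i] = the substitutions of all other implicants under substitutions[i]
  let ans : List (List (List PyElem)) :=
    (PySem.List.pyRange 0 (PySem.List.len implicants)).foldl (fun ans i =>
      ans ++ [(PySem.List.pyRange 0 (PySem.List.len implicants)).foldl (fun row j =>
        if i = j then row
        else
          let impJ := PySem.List.pyGetD implicants j []
          let subsI := PySem.List.pyGetD substitutions i []
          let implicant : List PyElem :=
            (PySem.List.pyRange 0 (PySem.List.len impJ)).foldl (fun implicant k =>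
              let keys := subsI.map (·.1)                  -- list(substitutions[i].keys())
              (PySem.List.pyRange 0 (PySem.List.len keys)).foldl (fun implicant l =>
                if k ≠ l then implicant
                else
                  let tok := PySem.List.pyGetD impJ k ""
                  if pvIsBang tok then
                    if keys.contains (pvTail tok) then
                      -- int(not substitutions[i][tok[1:]]); lookup is some here (guarded by the contains)
                      implicant ++ [PyElem.int (if (pvLookup subsI (pvTail tok)).getD 0 = 0 then 1 else 0)]
                    else implicant ++ [PyElem.str tok]
                  else
                    if keys.contains tok then
                      implicant ++ [PyElem.int ((pvLookup subsI tok).getD 0)]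
                    else implicant ++ [PyElem.str tok]) implicant) []
          row ++ [implicant]) []]) []
  -- pass 2: destructively drop every implicant containing 0
  let ans2 := ans.map (fun row => pvFilterLoop row 0)
  -- pass 3: per row, a dict of signed counts over the string elements
  let row_results : List (PySem.Dict String Int) :=
    (PySem.List.pyRange 0 (PySem.List.len ans2)).foldl (fun rr i =>
      let row := PySem.List.pyGetD ans2 i []
      rr ++ [(PySem.List.pyRange 0 (PySem.List.len row)).foldl (fun obj j =>
        (PySem.List.pyGetD row j []).foldl pvCStep obj) PySem.Dict.empty]) []
  -- pass 4: sum each dict over its keys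
  (PySem.List.pyRange 0 (PySem.List.len row_results)).foldl (fun answer i =>
    let d := PySem.List.pyGetD row_results i PySem.Dict.empty
    let keys := d.keys
    let sch := (PySem.List.pyRange 0 (PySem.List.len keys)).foldl (fun sch j =>
      sch + d.getD (PySem.List.pyGetD keys j "") 0) (0 : Int)
    if sch ≠ 0 then answer ++ [true] else answer ++ [false]) []

-- ===== PORT B =====

-- _row_sum(subs, toks): signed tally of one substituted implicant, None if it contains a 0
def pvRowSum (subs : List (String × Int)) (toks : List String) (total : Int) : Option Int :=
  match toks with
  | [] => some total
  | tok :: rest =>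
    let neg := PySem.Str.startswith tok "!"
    let key := if neg then pvTail tok else tok
    match pvLookup subs key with
    | some v => if (decide (v = 0)) != neg then none else pvRowSum subs rest total
    | none => pvRowSum subs rest (total + if neg then -1 else 1)

def reduction_implicants_alt (implicants : List (List String)) (substitutions : List (List (String × Int))) : List Bool :=
  (PySem.List.pyRange 0 (PySem.List.len implicants)).foldl (fun answer i =>
    let subs := PySem.List.pyGetD substitutions i []
    let sch := (PySem.List.enumerate implicants 0).foldl (fun sch p =>
      if p.1 = i then sch
      else match pvRowSum subs (p.2.take subs.length) 0 with    -- imp[:len(subs)]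
           | some res => sch + res
           | none => sch) (0 : Int)
    answer ++ [decide (sch ≠ 0)]) []

-- ===== PRECONDITION & SPEC =====
-- Pre_ excludes (a) the inputs on which Python A raises: an empty token at a position the
-- substitution pass reads (tok[0] is an IndexError), or an index i with substitutions[i] missing
-- while some other implicant is nonempty; and (b) the degenerate corner where substitutions is
-- shorter than implicants yet A never reads it (every other implicant empty, or a single
-- implicant): A returns all-False there while B, which reads substitutions[i] up front, raises.
def Pre_reduction_implicants (implicants : List (List String)) (substitutions : List (List (String × Int))) : Prop :=
  implicants.length ≤ substitutions.length ∧
  ∀ i < implicants.length, ∀ j < implicants.length, j ≠ i →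
    ∀ k < min ((implicants.getD j []).length) ((substitutions.getD i []).length),
      (implicants.getD j []).getD k "" ≠ ""
instance (implicants : List (List String)) (substitutions : List (List (String × Int))) : Decidable (Pre_reduction_implicants implicants substitutions) := by unfold Pre_reduction_implicants; infer_instance

def pvWitness_reduction_implicants : List (List String) × (List (List (String × Int))) :=
  ([["a", "!b"], ["!a"]], [[("a", 1)], [("a", 0), ("b", 1)]])

def Spec_reduction_implicants (implicants : List (List String)) (substitutions : List (List (String × Int))) (out : List Bool) : Prop := out = reduction_implicants_alt implicants substitutions
instance (implicants : List (List String)) (substitutions : List (List (String × Int))) (out : List Bool) : Decidable (Spec_reduction_implicants implicants substitutions out) := by unfold Spec_reduction_implicants; infer_instance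

-- ===== CLAIM (what is proved, stated in full; the proofs are below) =====
def Claim_equal_reduction_implicants : Prop := ∀ (implicants : List (List String)) (substitutions : List (List (String × Int))), Dom_reduction_implicants implicants substitutions → Pre_reduction_implicants implicants substitutions → Spec_reduction_implicants implicants substitutions (reduction_implicants implicants substitutions)

-- ===== LEMMAS AND PROOFS =====

theorem mem_map_fst_iff (subs : List (String × Int)) (t : String) :
    t ∈ subs.map (·.1) ↔ (pvLookup subs t).isSome := by
  induction subs with
  | nil => simp [pvLookup]
  | cons p rest ih =>
    by_cases h : p.1 = t
    · simp [pvLookup, List.find?_cons, h]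
    · have hb : (p.1 == t) = false := by simp [h]
      have hstep : pvLookup (p :: rest) t = pvLookup rest t := by
        simp [pvLookup, hb]
      rw [List.map_cons, List.mem_cons, hstep, ← ih]
      simp [Ne.symm h]

theorem pvIsBang_eq (s : String) : pvIsBang s = PySem.Str.startswith s "!" := by
  simp [pvIsBang, PySem.Str.pyGet?, PySem.Str.startswith, PySem.Chars.startswith]
  cases s.toList with
  | nil => simp [PySem.List.pyGet?]
  | cons c cs => simp [List.isPrefixOf]; exact eq_comm

def pvSubTok (subs : List (String × Int)) (tok : String) : PyElem :=
  if pvIsBang tok then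
    match pvLookup subs (pvTail tok) with
    | some v => PyElem.int (if v = 0 then 1 else 0)
    | none => PyElem.str tok
  else
    match pvLookup subs tok with
    | some v => PyElem.int v
    | none => PyElem.str tok

def pvSign : PyElem → Int
  | PyElem.int _ => 0
  | PyElem.str s => if pvIsBang s then -1 else 1

theorem pvRowSum_eq (subs : List (String × Int)) (toks : List String) (total : Int) :
    pvRowSum subs toks total =
      if PyElem.int 0 ∈ toks.map (pvSubTok subs) then none
      else some (total + ((toks.map (pvSubTok subs)).map pvSign).sum) := by
  induction toks generalizing total with
  | nil => simp [pvRowSum]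
  | cons tok rest ih =>
    rw [pvRowSum, ← pvIsBang_eq]
    by_cases hb : pvIsBang tok
    · simp only [hb, if_pos]
      cases hl : pvLookup subs (pvTail tok) with
      | some v =>
        by_cases hv : v = 0
        · simp [hv, pvSubTok, hb, hl, ih, pvSign]
          try (split_ifs <;> simp <;> ring)
        · simp [hv, Ne.symm hv, pvSubTok, hb, hl, ih, pvSign]
          try (split_ifs <;> simp <;> ring)
      | none =>
        simp [pvSubTok, hb, hl, ih, pvSign]
        try (split_ifs <;> simp <;> ring)
    · simp only [hb, if_neg, Bool.false_eq_true, not_false_iff]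
      cases hl : pvLookup subs tok with
      | some v =>
        by_cases hv : v = 0
        · simp [hv, pvSubTok, hb, hl, ih, pvSign]
          try (split_ifs <;> simp <;> ring)
        · simp [hv, Ne.symm hv, pvSubTok, hb, hl, ih, pvSign]
          try (split_ifs <;> simp <;> ring)
      | none =>
        simp [pvSubTok, hb, hl, ih, pvSign]
        try (split_ifs <;> simp <;> ring)

def pvSubImp (subs : List (String × Int)) (imp : List String) : List PyElem :=
  (imp.take subs.length).map (pvSubTok subs)

def pvRowVal (subs : List (String × Int)) (imp : List String) : Int :=
  if PyElem.int 0 ∈ pvSubImp subs imp then 0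
  else ((pvSubImp subs imp).map pvSign).sum

def pvTotal (implicants : List (List String)) (subs : List (String × Int)) (i : Nat) : Int :=
  ((List.range implicants.length).map
    (fun j => if j = i then 0 else pvRowVal subs (implicants.getD j []))).sum

theorem foldl_enum_add (g : Int → List String → Int) (xs : List (List String)) :
    ∀ (s : Int) (acc : Int),
      (PySem.List.enumerate xs s).foldl (fun a p => a + g p.1 p.2) acc =
        acc + ((List.range xs.length).map (fun (k : Nat) => g (s + (k : Int)) (xs.getD k []))).sum := by
  induction xs with
  | nil => intro s acc; simp [PySem.List.enumerate_nil]
  | cons x rest ih =>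
    intro s acc
    rw [PySem.List.enumerate_cons, List.foldl_cons, ih]
    rw [List.length_cons, List.range_succ_eq_map]
    simp only [List.map_cons, List.map_map, List.sum_cons]
    have hmap : (List.map ((fun k : Nat => g (s + ↑k) ((x :: rest).getD k [])) ∘ Nat.succ) (List.range rest.length))
        = List.map (fun k : Nat => g (s + 1 + ↑k) (rest.getD k [])) (List.range rest.length) := by
      apply List.map_congr_left
      intro k _
      simp [Function.comp, List.getD]
      ring_nf
    rw [hmap]
    simp only [List.getD_cons_zero]
    push_cast
    ring

theorem pv_B_eq (implicants : List (List String)) (substitutions : List (List (String × Int))) :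
    reduction_implicants_alt implicants substitutions =
      (List.range implicants.length).map
        (fun i => decide (pvTotal implicants (substitutions.getD i []) i ≠ 0)) := by
  rw [reduction_implicants_alt]
  rw [PySem.List.foldl_append_singleton_eq_map]
  simp only [PySem.List.len_eq, PySem.List.pyRange_one, Int.sub_zero, Int.toNat_natCast,
    List.map_map, List.nil_append]
  apply List.map_congr_left
  intro i _
  simp only [Function.comp, Int.zero_add, PySem.List.pyGetD_natCast]
  apply congrArg (fun z : Int => decide (z ≠ 0))
  have hcongr : (PySem.List.enumerate implicants 0).foldl (fun sch p =>
      if p.1 = (i : Int) then sch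
      else match pvRowSum (substitutions.getD i []) (p.2.take (substitutions.getD i []).length) 0 with
           | some res => sch + res
           | none => sch) (0 : Int)
      = (PySem.List.enumerate implicants 0).foldl (fun sch p =>
          sch + (if p.1 = (i : Int) then 0
                 else match pvRowSum (substitutions.getD i []) (p.2.take (substitutions.getD i []).length) 0 with
                      | some res => res
                      | none => 0)) (0 : Int) := by
    apply PySem.List.foldl_congr_mem
    intro acc p _
    by_cases hp : p.1 = (i : Int)
    · simp [hp]
    · cases pvRowSum (substitutions.getD i []) (p.2.take (substitutions.getD i []).length) 0 <;> simp [hp]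
  rw [hcongr, foldl_enum_add (fun j imp =>
      if j = (i : Int) then 0
      else match pvRowSum (substitutions.getD i []) (imp.take (substitutions.getD i []).length) 0 with
           | some res => res
           | none => 0)]
  simp only [Int.zero_add]
  rw [pvTotal]
  apply congrArg List.sum
  apply List.map_congr_left
  intro k _
  by_cases hk : k = i
  · simp [hk]
  · have : ((k : Int) = (i : Int)) = False := by simp [hk]
    simp only [this, if_false, Int.natCast_inj, hk]
    rw [pvRowSum_eq]
    simp only [pvRowVal, pvSubImp]
    by_cases hm : PyElem.int 0 ∈ (( (implicants.getD k []).take (substitutions.getD i []).length).map (pvSubTok (substitutions.getD i [])))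
    · rw [if_pos hm, if_pos hm]
    · rw [if_neg hm, if_neg hm]
      simp only [Int.zero_add]

theorem pvFilterLoop_invariant (row : List (List PyElem)) (i : Nat)
    (hpre : ∀ impl ∈ row.take i, impl.contains (PyElem.int 0) = false) :
    pvFilterLoop row i = row.take i ++ (row.drop i).filter (fun impl => !(impl.contains (PyElem.int 0))) := by
  induction row, i using pvFilterLoop.induct with
  | case1 row i h hbad ih =>
    rw [pvFilterLoop, dif_pos h, if_pos hbad, ih (by simp)]
    rw [List.eraseIdx_eq_take_drop_succ]
    simp only [List.take_zero, List.drop_zero, List.nil_append]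
    rw [List.filter_append]
    rw [List.filter_eq_self.mpr (by intro a ha; simpa using hpre a ha)]
    have hdrop : row.drop i = row[i] :: row.drop (i + 1) := (List.getElem_cons_drop h).symm
    rw [hdrop, List.filter_cons, hbad]
    simp
  | case2 row i h hgood ih =>
    have hg' : PyElem.int 0 ∉ row[i] := by simpa using hgood
    rw [pvFilterLoop, dif_pos h, if_neg hgood]
    rw [ih]
    · have hdrop : row.drop i = row[i] :: row.drop (i + 1) := (List.getElem_cons_drop h).symm
      have htake : row.take (i + 1) = row.take i ++ [row[i]] := by
        rw [List.take_add_one, List.getElem?_eq_getElem h]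
        rfl
      rw [hdrop, List.filter_cons, if_pos (by simp [hg'] : (!(row[i].contains (PyElem.int 0))) = true)]
      rw [htake, List.append_assoc]
      rfl
    · intro impl hm
      rw [List.take_add_one] at hm
      rcases List.mem_append.mp hm with h1 | h2
      · exact hpre impl h1
      · simp [List.getElem?_eq_getElem h] at h2
        rw [h2]
        simpa using hg'
  | case3 row i h =>
    rw [pvFilterLoop, dif_neg h]
    have : row.take i = row := List.take_of_length_le (by omega)
    rw [this, List.drop_eq_nil_of_le (by omega)]
    simp
theorem pvFilterLoop_zero (row : List (List PyElem)) :
    pvFilterLoop row 0 = row.filter (fun impl => !(impl.contains (PyElem.int 0))) := by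
  simpa using pvFilterLoop_invariant row 0 (by simp)

theorem sum_map_ite_mem (ks : List String) (κ : String) (g : String → Int) (a : Int)
    (hnd : ks.Nodup) (hk : κ ∈ ks) :
    (ks.map (fun j => if j = κ then a else g j)).sum = (ks.map g).sum - g κ + a := by
  induction ks with
  | nil => simp at hk
  | cons x rest ih =>
    rcases List.mem_cons.mp hk with h | h
    · subst h
      have hnot : κ ∉ rest := (List.nodup_cons.mp hnd).1
      have hcongr : ∀ j ∈ rest, (if j = κ then a else g j) = g j := by
        intro j hj
        rw [if_neg]
        intro he
        exact hnot (he ▸ hj)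
      rw [List.map_cons, List.map_cons, List.sum_cons, List.sum_cons, if_pos rfl]
      rw [List.map_congr_left hcongr]
      ring
    · have hxκ : x ≠ κ := by
        intro he
        exact (List.nodup_cons.mp hnd).1 (he ▸ h)
      rw [List.map_cons, List.map_cons, List.sum_cons, List.sum_cons, if_neg hxκ,
        ih (List.nodup_cons.mp hnd).2 h]
      ring

theorem sum_map_ite_not_mem (ks : List String) (κ : String) (g : String → Int) (a : Int)
    (hk : κ ∉ ks) :
    (ks.map (fun j => if j = κ then a else g j)).sum = (ks.map g).sum := by
  have hcongr : ∀ j ∈ ks, (if j = κ then a else g j) = g j := by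
    intro j hj
    rw [if_neg]
    intro he
    exact hk (he ▸ hj)
  rw [List.map_congr_left hcongr]

theorem pvDsum_incr (obj : PySem.Dict String Int) (κ : String) (δ : Int) (h : obj.keys.Nodup) :
    ((if obj.contains κ then obj.insert κ (obj.getD κ 0 + δ) else obj.insert κ δ)).values.sum
      = obj.values.sum + δ := by
  by_cases hc : obj.contains κ
  · rw [if_pos hc]
    have hkeys : (obj.insert κ (obj.getD κ 0 + δ)).keys = obj.keys :=
      PySem.Dict.keys_insert_of_contains obj _ hc
    rw [PySem.Dict.values_eq_map_keys _ (by rw [hkeys]; exact h) 0, hkeys]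
    have hget : ∀ j, (obj.insert κ (obj.getD κ 0 + δ)).getD j 0
        = if j = κ then obj.getD κ 0 + δ else obj.getD j 0 := fun j =>
      PySem.Dict.getD_insert obj κ j _ 0
    rw [List.map_congr_left (fun j _ => hget j)]
    rw [sum_map_ite_mem obj.keys κ (fun j => obj.getD j 0) _ h
      ((PySem.Dict.contains_iff_mem_keys obj κ).mp hc)]
    rw [PySem.Dict.values_eq_map_keys obj h 0]
    ring
  · rw [if_neg hc]
    have hkeys : (obj.insert κ δ).keys = obj.keys ++ [κ] :=
      PySem.Dict.keys_insert_of_not_contains obj _ (by simpa using hc)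
    have hnd' : (obj.insert κ δ).keys.Nodup := PySem.Dict.nodup_keys_insert obj κ δ h
    rw [PySem.Dict.values_eq_map_keys _ hnd' 0, hkeys]
    have hget : ∀ j, (obj.insert κ δ).getD j 0 = if j = κ then δ else obj.getD j 0 := fun j =>
      PySem.Dict.getD_insert obj κ j _ 0
    rw [List.map_congr_left (fun j _ => hget j)]
    have hkm : κ ∉ obj.keys := fun hm => hc ((PySem.Dict.contains_iff_mem_keys obj κ).mpr hm)
    rw [List.map_append, List.sum_append,
      sum_map_ite_not_mem obj.keys κ (fun j => obj.getD j 0) _ hkm]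
    rw [PySem.Dict.values_eq_map_keys obj h 0]
    simp

theorem pvCStep_dsum (obj : PySem.Dict String Int) (el : PyElem) (h : obj.keys.Nodup) :
    (pvCStep obj el).values.sum = obj.values.sum + pvSign el := by
  cases el with
  | int n => simp [pvCStep, pvSign]
  | str s =>
    by_cases hb : pvIsBang s
    · have := pvDsum_incr obj (pvTail s) (-1) h
      rw [pvCStep]
      simp only [hb, if_pos]
      rw [show obj.getD (pvTail s) 0 - 1 = obj.getD (pvTail s) 0 + (-1) by ring] at *
      rw [this]
      simp [pvSign, hb]
    · have := pvDsum_incr obj s 1 h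
      rw [pvCStep]
      simp only [hb, Bool.false_eq_true, if_false]
      rw [this]
      simp [pvSign, hb]

theorem pvCStep_nodup (obj : PySem.Dict String Int) (el : PyElem) (h : obj.keys.Nodup) :
    (pvCStep obj el).keys.Nodup := by
  cases el with
  | int n => simpa [pvCStep]
  | str s =>
    rw [pvCStep]
    split_ifs <;> exact PySem.Dict.nodup_keys_insert _ _ _ h

theorem pvCStep_foldl (els : List PyElem) (obj : PySem.Dict String Int) (h : obj.keys.Nodup) :
    (els.foldl pvCStep obj).values.sum = obj.values.sum + (els.map pvSign).sum
      ∧ (els.foldl pvCStep obj).keys.Nodup := by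
  induction els generalizing obj with
  | nil => simpa
  | cons el rest ih =>
    rcases ih (pvCStep obj el) (pvCStep_nodup obj el h) with ⟨h1, h2⟩
    refine ⟨?_, h2⟩
    rw [List.foldl_cons] at *
    rw [h1, pvCStep_dsum obj el h]
    simp [add_assoc]

theorem pvCStep_foldl_rows (R : List (List PyElem)) (obj : PySem.Dict String Int)
    (h : obj.keys.Nodup) :
    (R.foldl (fun o impl => impl.foldl pvCStep o) obj).values.sum
        = obj.values.sum + (R.map (fun impl => (impl.map pvSign).sum)).sum
      ∧ (R.foldl (fun o impl => impl.foldl pvCStep o) obj).keys.Nodup := by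
  induction R generalizing obj with
  | nil => simpa
  | cons impl rest ih =>
    rcases pvCStep_foldl impl obj h with ⟨h1, h2⟩
    rcases ih (impl.foldl pvCStep obj) h2 with ⟨h3, h4⟩
    refine ⟨?_, h4⟩
    rw [List.foldl_cons, h3, h1]
    simp [add_assoc]

theorem sum_filter_ite {α : Type} (l : List α) (p : α → Bool) (f : α → Int) :
    ((l.filter p).map f).sum = (l.map (fun x => if p x then f x else 0)).sum := by
  induction l with
  | nil => simp
  | cons x rest ih =>
    rw [List.filter_cons]
    by_cases hp : p x <;> simp [hp, ih]
theorem filter_range_eq (K kn : Nat) :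
    (List.range K).filter (fun l => l == kn) = if kn < K then [kn] else [] := by
  induction K with
  | zero => simp
  | succ K ih =>
    rw [List.range_succ, List.filter_append, ih, List.filter_cons, List.filter_nil]
    by_cases h3 : kn = K
    · subst h3
      rw [if_neg (lt_irrefl kn), if_pos (Nat.lt_succ_self kn)]
      simp
    · have h2 : (K == kn) = false := by simp [Ne.symm h3]
      rw [h2]
      by_cases h1 : kn < K
      · rw [if_pos h1, if_pos (show kn < K + 1 by omega)]
        simp
      · rw [if_neg h1, if_neg (show ¬kn < K + 1 by omega)]
        simp

theorem inner_l_fold (keysLen kn : Nat) (E : PyElem) (acc : List PyElem) :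
    (PySem.List.pyRange 0 (keysLen : Int)).foldl
      (fun acc l => if (kn : Int) = l then acc ++ [E] else acc) acc
      = acc ++ (if kn < keysLen then [E] else []) := by
  have hc : (PySem.List.pyRange 0 (keysLen : Int)).foldl
      (fun acc l => if (kn : Int) = l then acc ++ [E] else acc) acc
      = (PySem.List.pyRange 0 (keysLen : Int)).foldl
        (fun acc l => if (l == (kn : Int)) then acc ++ [(fun _ : Int => E) l] else acc) acc := by
    apply PySem.List.foldl_congr_mem
    intro a l _
    by_cases h : (kn : Int) = l
    · simp [h]
    · simp [h, Ne.symm h]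
  rw [hc, PySem.List.foldl_append_if]
  congr 1
  rw [PySem.List.pyRange_one]
  simp only [Int.sub_zero, Int.toNat_natCast]
  rw [List.filter_map]
  have : ((fun l : Int => l == (kn : Int)) ∘ (fun k : Nat => (0 : Int) + ↑k)) = (fun l : Nat => l == kn) := by
    funext l
    simp
  rw [this, filter_range_eq]
  by_cases h : kn < keysLen <;> simp [h]

theorem k_fold (M K : Nat) (f : Nat → PyElem) (acc : List PyElem) :
    (List.range M).foldl (fun acc kn => acc ++ (if kn < K then [f kn] else [])) acc
       = acc ++ (List.range (min M K)).map f := by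
  induction M generalizing acc with
  | zero => simp
  | succ M ih =>
    rw [List.range_succ, List.foldl_append, ih]
    simp only [List.foldl_cons, List.foldl_nil]
    by_cases hM : M < K
    · rw [if_pos hM, show min (M + 1) K = min M K + 1 by omega, List.range_succ]
      simp [show min M K = M by omega]
    · rw [if_neg hM, show min (M + 1) K = min M K by omega]
      simp

theorem range_min_map_eq_take (imp : List String) (K : Nat) (g : String → PyElem) :
    (List.range (min imp.length K)).map (fun kn => g (imp.getD kn "")) = (imp.take K).map g := by
  apply List.ext_getElem
  · simp [Nat.min_comm]
  · intro n h1 h2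
    simp only [List.getElem_map, List.getElem_range, List.getElem_take]
    congr 1
    rw [List.getD_eq_getElem?_getD, List.getElem?_eq_getElem (by simp at h1 ⊢; omega)]
    rfl

def pvBody (subs : List (String × Int)) (tok : String) : PyElem :=
  if pvIsBang tok then
    if (subs.map (·.1)).contains (pvTail tok) then
      PyElem.int (if (pvLookup subs (pvTail tok)).getD 0 = 0 then 1 else 0)
    else PyElem.str tok
  else
    if (subs.map (·.1)).contains tok then PyElem.int ((pvLookup subs tok).getD 0)
    else PyElem.str tok

theorem pvBody_eq (subs : List (String × Int)) (tok : String) :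
    pvBody subs tok = pvSubTok subs tok := by
  rw [pvBody, pvSubTok]
  by_cases hb : pvIsBang tok
  · simp only [hb, if_pos]
    cases hl : pvLookup subs (pvTail tok) with
    | some v =>
      have hm : pvTail tok ∈ subs.map (·.1) := (mem_map_fst_iff subs _).mpr (by simp [hl])
      simp [hm, hl]
    | none =>
      have hm : pvTail tok ∉ subs.map (·.1) := fun hc => by
        have := (mem_map_fst_iff subs _).mp hc
        simp [hl] at this
      simp [hm, hl]
  · simp only [hb, Bool.false_eq_true, if_false]
    cases hl : pvLookup subs tok with
    | some v =>
      have hm : tok ∈ subs.map (·.1) := (mem_map_fst_iff subs _).mpr (by simp [hl])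
      simp [hm, hl]
    | none =>
      have hm : tok ∉ subs.map (·.1) := fun hc => by
        have := (mem_map_fst_iff subs _).mp hc
        simp [hl] at this
      simp [hm, hl]

theorem l_fold_lit (subsI : List (String × Int)) (impJ : List String) (kn : Nat)
    (acc : List PyElem) :
    (PySem.List.pyRange 0 (PySem.List.len (subsI.map (·.1)))).foldl (fun implicant l =>
      if (kn : Int) ≠ l then implicant
      else
        if pvIsBang (PySem.List.pyGetD impJ (kn : Int) "") then
          if (subsI.map (·.1)).contains (pvTail (PySem.List.pyGetD impJ (kn : Int) "")) then
            implicant ++ [PyElem.int (if (pvLookup subsI (pvTail (PySem.List.pyGetD impJ (kn : Int) ""))).getD 0 = 0 then 1 else 0)]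
          else implicant ++ [PyElem.str (PySem.List.pyGetD impJ (kn : Int) "")]
        else
          if (subsI.map (·.1)).contains (PySem.List.pyGetD impJ (kn : Int) "") then
            implicant ++ [PyElem.int ((pvLookup subsI (PySem.List.pyGetD impJ (kn : Int) "")).getD 0)]
          else implicant ++ [PyElem.str (PySem.List.pyGetD impJ (kn : Int) "")]) acc
    = acc ++ (if kn < subsI.length then [pvSubTok subsI (impJ.getD kn "")] else []) := by
  have hc : ∀ (a : List PyElem), ∀ l ∈ PySem.List.pyRange 0 (PySem.List.len (subsI.map (·.1))),
      (if (kn : Int) ≠ l then a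
       else
        if pvIsBang (PySem.List.pyGetD impJ (kn : Int) "") then
          if (subsI.map (·.1)).contains (pvTail (PySem.List.pyGetD impJ (kn : Int) "")) then
            a ++ [PyElem.int (if (pvLookup subsI (pvTail (PySem.List.pyGetD impJ (kn : Int) ""))).getD 0 = 0 then 1 else 0)]
          else a ++ [PyElem.str (PySem.List.pyGetD impJ (kn : Int) "")]
        else
          if (subsI.map (·.1)).contains (PySem.List.pyGetD impJ (kn : Int) "") then
            a ++ [PyElem.int ((pvLookup subsI (PySem.List.pyGetD impJ (kn : Int) "")).getD 0)]
          else a ++ [PyElem.str (PySem.List.pyGetD impJ (kn : Int) "")])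
      = if (kn : Int) = l then a ++ [pvBody subsI (PySem.List.pyGetD impJ (kn : Int) "")] else a := by
    intro a l _
    by_cases h : (kn : Int) = l
    · rw [if_neg (by simpa using h), if_pos h, pvBody]
      split_ifs <;> rfl
    · rw [if_pos h, if_neg h]
  rw [PySem.List.foldl_congr_mem _ _ _ acc hc]
  have h2 := inner_l_fold (subsI.map (·.1)).length kn
    (pvBody subsI (PySem.List.pyGetD impJ (kn : Int) "")) acc
  rw [show PySem.List.len (subsI.map (·.1)) = (((subsI.map (·.1)).length : Nat) : Int) by simp] at *
  have hstep : ∀ (a : List PyElem), ∀ l ∈ PySem.List.pyRange 0 (((subsI.map (·.1)).length : Nat) : Int),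
      (if (kn : Int) = l then a ++ [pvBody subsI (PySem.List.pyGetD impJ (kn : Int) "")] else a)
      = (if (kn : Int) = l then a ++ [pvBody subsI (PySem.List.pyGetD impJ (kn : Int) "")] else a) :=
    fun _ _ _ => rfl
  rw [h2, List.length_map, pvBody_eq, PySem.List.pyGetD_natCast]

theorem k_fold_int (M K : Nat) (f : Nat → PyElem) (acc : List PyElem) :
    (PySem.List.pyRange 0 ((M : Nat) : Int)).foldl
      (fun acc k => acc ++ (if k.toNat < K then [f k.toNat] else [])) acc
      = acc ++ (List.range (min M K)).map f := by
  rw [PySem.List.pyRange_one]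
  simp only [Int.sub_zero, Int.toNat_natCast, List.foldl_map]
  have hc : ∀ (a : List PyElem), ∀ kn ∈ List.range M,
      ((fun acc (k : Int) => acc ++ (if k.toNat < K then [f k.toNat] else [])) a ((0 : Int) + (kn : Int)))
        = a ++ (if kn < K then [f kn] else []) := by
    intro a kn _
    simp
  rw [PySem.List.foldl_congr_mem _ _ _ acc hc]
  exact k_fold M K f acc

theorem k_l_fold_eq (subsI : List (String × Int)) (impJ : List String) :
    (PySem.List.pyRange 0 (PySem.List.len impJ)).foldl (fun implicant k =>
      (PySem.List.pyRange 0 (PySem.List.len (subsI.map (·.1)))).foldl (fun implicant l =>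
        if k ≠ l then implicant
        else
          if pvIsBang (PySem.List.pyGetD impJ k "") then
            if (subsI.map (·.1)).contains (pvTail (PySem.List.pyGetD impJ k "")) then
              implicant ++ [PyElem.int (if (pvLookup subsI (pvTail (PySem.List.pyGetD impJ k ""))).getD 0 = 0 then 1 else 0)]
            else implicant ++ [PyElem.str (PySem.List.pyGetD impJ k "")]
          else
            if (subsI.map (·.1)).contains (PySem.List.pyGetD impJ k "") then
              implicant ++ [PyElem.int ((pvLookup subsI (PySem.List.pyGetD impJ k "")).getD 0)]
            else implicant ++ [PyElem.str (PySem.List.pyGetD impJ k "")]) implicant) []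
    = pvSubImp subsI impJ := by
  have hc : ∀ (a : List PyElem), ∀ k ∈ PySem.List.pyRange 0 (PySem.List.len impJ),
      ((PySem.List.pyRange 0 (PySem.List.len (subsI.map (·.1)))).foldl (fun implicant l =>
        if k ≠ l then implicant
        else
          if pvIsBang (PySem.List.pyGetD impJ k "") then
            if (subsI.map (·.1)).contains (pvTail (PySem.List.pyGetD impJ k "")) then
              implicant ++ [PyElem.int (if (pvLookup subsI (pvTail (PySem.List.pyGetD impJ k ""))).getD 0 = 0 then 1 else 0)]
            else implicant ++ [PyElem.str (PySem.List.pyGetD impJ k "")]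
          else
            if (subsI.map (·.1)).contains (PySem.List.pyGetD impJ k "") then
              implicant ++ [PyElem.int ((pvLookup subsI (PySem.List.pyGetD impJ k "")).getD 0)]
            else implicant ++ [PyElem.str (PySem.List.pyGetD impJ k "")]) a)
      = a ++ (if k.toNat < subsI.length then [pvSubTok subsI (impJ.getD k.toNat "")] else []) := by
    intro a k hk
    have h0 : (0 : Int) ≤ k := by
      have := PySem.List.mem_pyRange_one.mp hk
      omega
    have hkk : k = ((k.toNat : Nat) : Int) := by omega
    rw [hkk]
    simp only [Int.toNat_natCast]
    exact l_fold_lit subsI impJ k.toNat a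
  rw [PySem.List.foldl_congr_mem _ _ _ ([] : List PyElem) hc]
  rw [show PySem.List.len impJ = ((impJ.length : Nat) : Int) by simp]
  rw [k_fold_int impJ.length subsI.length (fun kn => pvSubTok subsI (impJ.getD kn "")) []]
  rw [List.nil_append, pvSubImp]
  exact range_min_map_eq_take impJ subsI.length (pvSubTok subsI)
def pvRowListA (imps : List (List String)) (subs : List (List (String × Int))) (iN : Nat) :
    List (List PyElem) :=
  ((List.range imps.length).filter (fun jN => !(jN == iN))).map
    (fun jN => pvSubImp (subs.getD iN []) (imps.getD jN []))

theorem P3_eq (xs : List (List (List PyElem))) :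
    (PySem.List.pyRange 0 (PySem.List.len xs)).foldl (fun rr i =>
      rr ++ [(PySem.List.pyRange 0 (PySem.List.len (PySem.List.pyGetD xs i []))).foldl (fun obj j =>
        (PySem.List.pyGetD (PySem.List.pyGetD xs i []) j []).foldl pvCStep obj) PySem.Dict.empty]) []
    = xs.map (fun row => row.foldl (fun o impl => impl.foldl pvCStep o) PySem.Dict.empty) := by
  rw [PySem.List.foldl_pyRange_zero_pyGetD xs []
    (fun rr row => rr ++ [(PySem.List.pyRange 0 (PySem.List.len row)).foldl (fun obj j =>
      (PySem.List.pyGetD row j []).foldl pvCStep obj) PySem.Dict.empty]) []]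
  have hc : ∀ (acc : List (PySem.Dict String Int)), ∀ row ∈ xs,
      acc ++ [(PySem.List.pyRange 0 (PySem.List.len row)).foldl (fun obj j =>
        (PySem.List.pyGetD row j []).foldl pvCStep obj) PySem.Dict.empty]
      = acc ++ [row.foldl (fun o impl => impl.foldl pvCStep o) PySem.Dict.empty] := by
    intro acc row _
    rw [PySem.List.foldl_pyRange_zero_pyGetD row []
      (fun obj impl => impl.foldl pvCStep obj) PySem.Dict.empty]
  rw [PySem.List.foldl_congr_mem _ _ _ [] hc,
    PySem.List.foldl_append_singleton_eq_map, List.nil_append]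

theorem P4_eq (xs : List (PySem.Dict String Int)) :
    (PySem.List.pyRange 0 (PySem.List.len xs)).foldl (fun answer i =>
      if ((PySem.List.pyRange 0 (PySem.List.len (PySem.List.pyGetD xs i PySem.Dict.empty).keys)).foldl
          (fun sch j => sch + (PySem.List.pyGetD xs i PySem.Dict.empty).getD
            (PySem.List.pyGetD (PySem.List.pyGetD xs i PySem.Dict.empty).keys j "") 0) (0 : Int)) ≠ 0
      then answer ++ [true] else answer ++ [false]) []
    = xs.map (fun d => decide ((d.keys.map (fun κ => d.getD κ 0)).sum ≠ 0)) := by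
  rw [PySem.List.foldl_pyRange_zero_pyGetD xs PySem.Dict.empty
    (fun answer d => if ((PySem.List.pyRange 0 (PySem.List.len d.keys)).foldl
        (fun sch j => sch + d.getD (PySem.List.pyGetD d.keys j "") 0) (0 : Int)) ≠ 0
      then answer ++ [true] else answer ++ [false]) []]
  have hc : ∀ (acc : List Bool), ∀ d ∈ xs,
      (if ((PySem.List.pyRange 0 (PySem.List.len d.keys)).foldl
          (fun sch j => sch + d.getD (PySem.List.pyGetD d.keys j "") 0) (0 : Int)) ≠ 0
        then acc ++ [true] else acc ++ [false])
      = acc ++ [decide ((d.keys.map (fun κ => d.getD κ 0)).sum ≠ 0)] := by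
    intro acc d _
    rw [PySem.List.foldl_pyRange_zero_pyGetD d.keys "" (fun sch κ => sch + d.getD κ 0) (0 : Int)]
    rw [PySem.List.foldl_add]
    rw [Int.zero_add]
    by_cases h : (d.keys.map (fun κ => d.getD κ 0)).sum ≠ 0
    · rw [if_pos h, decide_eq_true h]
    · rw [if_neg h]
      simp at h
      simp [h]
  rw [PySem.List.foldl_congr_mem _ _ _ [] hc,
    PySem.List.foldl_append_singleton_eq_map, List.nil_append]

theorem final_row (imps : List (List String)) (subs : List (List (String × Int))) (iN : Nat) :
    (List.map
      (fun κ => (((pvRowListA imps subs iN).filter (fun impl => !(impl.contains (PyElem.int 0)))).foldl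
        (fun o impl => impl.foldl pvCStep o) PySem.Dict.empty).getD κ 0)
      (((pvRowListA imps subs iN).filter (fun impl => !(impl.contains (PyElem.int 0)))).foldl
        (fun o impl => impl.foldl pvCStep o) PySem.Dict.empty).keys).sum
    = pvTotal imps (subs.getD iN []) iN := by
  set R := (pvRowListA imps subs iN).filter (fun impl => !(impl.contains (PyElem.int 0))) with hR
  obtain ⟨hsum, hnd⟩ := pvCStep_foldl_rows R PySem.Dict.empty (by
    have := PySem.Dict.nodup_keys_empty (κ := String) (ν := Int)
    simpa using this)
  rw [← PySem.Dict.values_eq_map_keys _ hnd 0, hsum]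
  have hempty : (PySem.Dict.empty : PySem.Dict String Int).values.sum = 0 := by decide
  rw [hempty, Int.zero_add]
  rw [hR, pvRowListA, List.filter_map, List.map_map]
  rw [show ((fun impl => (impl.map pvSign).sum) ∘ (fun jN => pvSubImp (subs.getD iN []) (imps.getD jN [])))
      = fun jN => ((pvSubImp (subs.getD iN []) (imps.getD jN [])).map pvSign).sum from rfl]
  rw [List.filter_filter]
  have hfil := sum_filter_ite ((List.range imps.length))
    (fun jN => ((!(jN == iN)) && (!( (pvSubImp (subs.getD iN []) (imps.getD jN [])).contains (PyElem.int 0)))))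
    (fun jN => ((pvSubImp (subs.getD iN []) (imps.getD jN [])).map pvSign).sum)
  rw [show (fun a => ((fun impl => !impl.contains (PyElem.int 0)) ∘ fun jN => pvSubImp (subs.getD iN []) (imps.getD jN [])) a && !(a == iN))
      = (fun jN => ((!(jN == iN)) && (!((pvSubImp (subs.getD iN []) (imps.getD jN [])).contains (PyElem.int 0))))) from by
    funext jN
    simp [Function.comp, Bool.and_comm]]
  rw [hfil, pvTotal]
  apply congrArg List.sum
  apply List.map_congr_left
  intro jN _
  by_cases hji : jN = iN
  · simp [hji]
  · by_cases hm : PyElem.int 0 ∈ pvSubImp (subs.getD iN []) (imps.getD jN [])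
    · simp [hji, hm, pvRowVal]
    · simp [hji, hm, pvRowVal]
theorem P1_eq (implicants : List (List String)) (substitutions : List (List (String × Int))) :
    (PySem.List.pyRange 0 (PySem.List.len implicants)).foldl (fun ans i =>
      ans ++ [(PySem.List.pyRange 0 (PySem.List.len implicants)).foldl (fun row j =>
        if i = j then row
        else
          row ++ [(PySem.List.pyRange 0 (PySem.List.len (PySem.List.pyGetD implicants j []))).foldl (fun implicant k =>
            (PySem.List.pyRange 0 (PySem.List.len ((PySem.List.pyGetD substitutions i []).map (·.1)))).foldl (fun implicant l =>
              if k ≠ l then implicant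
              else
                if pvIsBang (PySem.List.pyGetD (PySem.List.pyGetD implicants j []) k "") then
                  if ((PySem.List.pyGetD substitutions i []).map (·.1)).contains (pvTail (PySem.List.pyGetD (PySem.List.pyGetD implicants j []) k "")) then
                    implicant ++ [PyElem.int (if (pvLookup (PySem.List.pyGetD substitutions i []) (pvTail (PySem.List.pyGetD (PySem.List.pyGetD implicants j []) k ""))).getD 0 = 0 then 1 else 0)]
                  else implicant ++ [PyElem.str (PySem.List.pyGetD (PySem.List.pyGetD implicants j []) k "")]
                else
                  if ((PySem.List.pyGetD substitutions i []).map (·.1)).contains (PySem.List.pyGetD (PySem.List.pyGetD implicants j []) k "") then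
                    implicant ++ [PyElem.int ((pvLookup (PySem.List.pyGetD substitutions i []) (PySem.List.pyGetD (PySem.List.pyGetD implicants j []) k "")).getD 0)]
                  else implicant ++ [PyElem.str (PySem.List.pyGetD (PySem.List.pyGetD implicants j []) k "")]) implicant) []]) []]) []
    = (List.range implicants.length).map (pvRowListA implicants substitutions) := by
  simp only [k_l_fold_eq]
  rw [PySem.List.foldl_append_singleton_eq_map, List.nil_append]
  rw [show PySem.List.len implicants = ((implicants.length : Nat) : Int) from by simp,
    PySem.List.pyRange_one]
  simp only [Int.sub_zero, Int.toNat_natCast, List.map_map, List.foldl_map]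
  apply List.map_congr_left
  intro iN _
  simp only [Function.comp_apply, zero_add]
  have hc : ∀ (row : List (List PyElem)), ∀ jn ∈ List.range implicants.length,
      (if ((iN : Nat) : Int) = ((jn : Nat) : Int) then row
       else row ++ [pvSubImp (PySem.List.pyGetD substitutions ((iN : Nat) : Int) [])
         (PySem.List.pyGetD implicants ((jn : Nat) : Int) [])])
      = if (!(jn == iN)) then
          row ++ [pvSubImp (substitutions.getD iN []) (implicants.getD jn [])]
        else row := by
    intro row jn _
    by_cases h : jn = iN
    · simp [h]
    · simp [h, Ne.symm h]
  rw [PySem.List.foldl_congr_mem _ _ _ [] hc]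
  rw [PySem.List.foldl_append_if, List.nil_append, pvRowListA]

theorem pv_A_eq (implicants : List (List String)) (substitutions : List (List (String × Int))) :
    reduction_implicants implicants substitutions =
      (List.range implicants.length).map
        (fun i => decide (pvTotal implicants (substitutions.getD i []) i ≠ 0)) := by
  simp only [reduction_implicants]
  rw [P1_eq, P3_eq, P4_eq]
  simp only [List.map_map]
  apply List.map_congr_left
  intro iN _
  simp only [Function.comp_apply]
  simp only [pvFilterLoop_zero, final_row]

-- ===== VERDICT (by name: the statement is the Claim_ definition above) =====
theorem reduction_implicants_spec : Claim_equal_reduction_implicants := by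
  intro implicants substitutions _ _
  unfold Spec_reduction_implicants
  rw [pv_A_eq, pv_B_eq]
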